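-- pv_equiv track=rewrite | github.com/Oussama-belhout/Paclabi | src/algorithms/maze/pellets/classic_placer.py | _select_separated_locations
-- ===== SOURCE A (Python) =====
-- def _select_separated_locations(candidates, count):
--     """Select locations that are maximally separated from each other."""
--     if len(candidates) <= count:
--         return candidates
--
--     # Greedy selection: pick locations that maximize minimum distance
--     selected = [candidates[0]]
--
--     while len(selected) < count:
--         best_candidate = None
--         best_min_distance = -1
--
--         for candidate in candidates:
--             if candidate in selected:
--                 continue
--
--             # Calculate minimum distance to already selected locations
--             min_distance = min(
--                 abs(candidate[0] - s[0]) + abs(candidate[1] - s[1])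
--                 for s in selected
--             )
--
--             if min_distance > best_min_distance:
--                 best_min_distance = min_distance
--                 best_candidate = candidate
--
--         if best_candidate:
--             selected.append(best_candidate)
--         else:
--             break
--
--     return selected
-- ===== SOURCE B (Python) =====
-- def _select_separated_locations(candidates, count):
--     """Select locations that are maximally separated from each other.
--
--     Same greedy as the original, but keeps a per-candidate minimum distance
--     to the selected set, updated only against the newly added point."""
--     if len(candidates) <= count:
--         return candidates
--
--     c0 = candidates[0]
--     # (candidate, min Manhattan distance to selected so far)
--     pts = [(c, abs(c[0] - c0[0]) + abs(c[1] - c0[1])) for c in candidates]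
--     selected = [c0]
--
--     while len(selected) < count:
--         best = None
--         best_d = 0
--         for c, d in pts:
--             if d > best_d:
--                 best_d = d
--                 best = c
--         if best is None:
--             break
--         selected.append(best)
--         pts = [(c, min(d, abs(c[0] - best[0]) + abs(c[1] - best[1]))) for c, d in pts]
--
--     return selected
-- ===== Notes on version B (the rewrite author's own statement) =====
-- stated objective: faster
-- what changed: Replaces A's recomputation of each candidate's minimum distance over the whole selected list in every round by a per-candidate running minimum distance updated only against the newly added point, turning the inner min-over-selected scan into an O(1) lookup.
import Mathlib
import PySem

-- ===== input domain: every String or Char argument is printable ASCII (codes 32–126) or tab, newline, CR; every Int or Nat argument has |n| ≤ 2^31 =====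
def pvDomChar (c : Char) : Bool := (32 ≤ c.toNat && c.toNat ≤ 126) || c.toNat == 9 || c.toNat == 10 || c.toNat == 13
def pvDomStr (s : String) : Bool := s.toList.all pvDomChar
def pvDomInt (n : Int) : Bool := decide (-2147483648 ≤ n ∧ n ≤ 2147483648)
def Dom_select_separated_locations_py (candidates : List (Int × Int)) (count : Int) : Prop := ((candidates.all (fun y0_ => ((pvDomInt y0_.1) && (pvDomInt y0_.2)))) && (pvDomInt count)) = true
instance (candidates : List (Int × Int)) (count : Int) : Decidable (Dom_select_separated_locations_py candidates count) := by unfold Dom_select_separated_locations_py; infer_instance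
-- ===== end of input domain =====

-- B replaces A's rescan of the whole selected list for every candidate in every round
-- (O(count^2·N)) by a per-candidate running minimum distance updated only against the
-- newly added point (O(count·N)); objective: faster, same greedy result.

-- Manhattan distance, shared arithmetic of both ports
def pvDist (c s : Int × Int) : Int := |c.1 - s.1| + |c.2 - s.2|

-- ===== PORT A =====
-- Python's min(... for s in selected); selected is nonempty at every call site
-- (the [] case is unreachable, Python would raise ValueError on an empty generator).
def pvMinDist (c : Int × Int) : List (Int × Int) → Int
  | [] => 0
  | s :: rest => rest.foldl (fun m t => min m (pvDist c t)) (pvDist c s)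

-- body of A's `for candidate in candidates` scan; state = (best_candidate, best_min_distance)
def pvAStep (sel : List (Int × Int)) (st : Option (Int × Int) × Int) (c : Int × Int) :
    Option (Int × Int) × Int :=
  if c ∈ sel then st
  else
    let md := pvMinDist c sel
    if md > st.2 then (some c, md) else st

def pvAScan (candidates sel : List (Int × Int)) : Option (Int × Int) × Int :=
  candidates.foldl (pvAStep sel) (none, -1)

-- A's while-loop; fuel = count - len(selected) (the loop appends one element per turn)
def pvALoop (candidates : List (Int × Int)) : Nat → List (Int × Int) → List (Int × Int)
  | 0, sel => sel
  | fuel + 1, sel =>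
    match (pvAScan candidates sel).1 with
    | some c => pvALoop candidates fuel (sel ++ [c])   -- `if best_candidate:` a 2-tuple is always truthy
    | none => sel                                       -- `else: break`

def select_separated_locations_py (candidates : List (Int × Int)) (count : Int) : List (Int × Int) :=
  if (candidates.length : Int) ≤ count then candidates
  else
    match candidates with
    | [] => []            -- Python raises IndexError on candidates[0]; excluded by Pre_
    | c0 :: _ => pvALoop candidates (count - 1).toNat [c0]

-- ===== PORT B =====
-- body of B's `for c, d in pts` scan; state = (best, best_d), best_d starts at 0
def pvBStep (st : Option (Int × Int) × Int) (cd : (Int × Int) × Int) :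
    Option (Int × Int) × Int :=
  if cd.2 > st.2 then (some cd.1, cd.2) else st

def pvBScan (pts : List ((Int × Int) × Int)) : Option (Int × Int) × Int :=
  pts.foldl pvBStep (none, 0)

-- B's rebuild of pts against the newly selected point
def pvBUpdate (pts : List ((Int × Int) × Int)) (p : Int × Int) : List ((Int × Int) × Int) :=
  pts.map (fun cd => (cd.1, min cd.2 (pvDist cd.1 p)))

def pvBLoop : Nat → List ((Int × Int) × Int) → List (Int × Int) → List (Int × Int)
  | 0, _, sel => sel
  | fuel + 1, pts, sel =>
    match (pvBScan pts).1 with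
    | some p => pvBLoop fuel (pvBUpdate pts p) (sel ++ [p])
    | none => sel

def select_separated_locations_py_alt (candidates : List (Int × Int)) (count : Int) : List (Int × Int) :=
  if (candidates.length : Int) ≤ count then candidates
  else
    match candidates with
    | [] => []            -- B's Python also raises IndexError here; excluded by Pre_
    | c0 :: _ =>
      pvBLoop (count - 1).toNat (candidates.map fun c => (c, pvDist c c0)) [c0]

-- ===== PRECONDITION & SPEC =====
-- Pre_ excludes only (candidates = [] with count < 0), where both Pythons raise IndexError.
def Pre_select_separated_locations_py (candidates : List (Int × Int)) (count : Int) : Prop :=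
  candidates ≠ [] ∨ 0 ≤ count
instance (candidates : List (Int × Int)) (count : Int) : Decidable (Pre_select_separated_locations_py candidates count) := by unfold Pre_select_separated_locations_py; infer_instance
def pvWitness_select_separated_locations_py : (List (Int × Int)) × Int := ([(0, 0), (3, 1), (1, 4)], 2)
def Spec_select_separated_locations_py (candidates : List (Int × Int)) (count : Int) (out : List (Int × Int)) : Prop := out = select_separated_locations_py_alt candidates count
instance (candidates : List (Int × Int)) (count : Int) (out : List (Int × Int)) : Decidable (Spec_select_separated_locations_py candidates count out) := by unfold Spec_select_separated_locations_py; infer_instance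

-- ===== CLAIM (what is proved, stated in full; the proofs are below) =====
def Claim_equal_select_separated_locations_py : Prop := ∀ (candidates : List (Int × Int)) (count : Int), Dom_select_separated_locations_py candidates count → Pre_select_separated_locations_py candidates count → Spec_select_separated_locations_py candidates count (select_separated_locations_py candidates count)

-- ===== LEMMAS AND PROOFS =====

theorem pvDist_nonneg (c s : Int × Int) : 0 ≤ pvDist c s := by
  unfold pvDist; have := abs_nonneg (c.1 - s.1); have := abs_nonneg (c.2 - s.2); omega

theorem pvDist_eq_zero (c s : Int × Int) : pvDist c s = 0 ↔ c = s := by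
  unfold pvDist
  constructor
  · intro h
    have h1 := abs_nonneg (c.1 - s.1); have h2 := abs_nonneg (c.2 - s.2)
    have e1 : |c.1 - s.1| = 0 := by omega
    have e2 : |c.2 - s.2| = 0 := by omega
    rw [abs_eq_zero, sub_eq_zero] at e1 e2
    exact Prod.ext e1 e2
  · rintro rfl; simp

theorem foldl_min_le_init : ∀ (l : List Int) (a : Int), l.foldl min a ≤ a
  | [], _ => le_refl _
  | x :: l, a => le_trans (foldl_min_le_init l (min a x)) (min_le_left a x)

theorem foldl_min_le_mem : ∀ (l : List Int) (a x : Int), x ∈ l → l.foldl min a ≤ x := by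
  intro l
  induction l with
  | nil => intro a x hx; cases hx
  | cons y l ih =>
    intro a x hx
    rcases List.mem_cons.mp hx with rfl | hx
    · exact le_trans (foldl_min_le_init l (min a x)) (min_le_right a x)
    · exact ih (min a y) x hx

theorem foldl_min_cases : ∀ (l : List Int) (a : Int), l.foldl min a = a ∨ ∃ x ∈ l, l.foldl min a = x := by
  intro l
  induction l with
  | nil => intro a; exact Or.inl rfl
  | cons y l ih =>
    intro a
    rcases ih (min a y) with h | ⟨x, hx, h⟩
    · rcases min_cases a y with ⟨e, _⟩ | ⟨e, _⟩
      · exact Or.inl (by simpa [e] using h)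
      · exact Or.inr ⟨y, List.mem_cons_self .., by simpa [e] using h⟩
    · exact Or.inr ⟨x, List.mem_cons_of_mem _ hx, by simpa using h⟩

-- pvMinDist rewritten as a fold of `min` over mapped distances
theorem pvMinDist_eq_foldl (c s : Int × Int) (rest : List (Int × Int)) :
    pvMinDist c (s :: rest) = (rest.map (pvDist c)).foldl min (pvDist c s) := by
  simp [pvMinDist, List.foldl_map]

theorem pvMinDist_nonneg (c : Int × Int) (sel : List (Int × Int)) (h : sel ≠ []) :
    0 ≤ pvMinDist c sel := by
  cases sel with
  | nil => exact absurd rfl h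
  | cons s rest =>
    rw [pvMinDist_eq_foldl]
    rcases foldl_min_cases (rest.map (pvDist c)) (pvDist c s) with h | ⟨x, hx, h⟩
    · rw [h]; exact pvDist_nonneg c s
    · rw [h]; rcases List.mem_map.mp hx with ⟨t, _, rfl⟩; exact pvDist_nonneg c t

theorem pvMinDist_zero_iff (c : Int × Int) (sel : List (Int × Int)) (h : sel ≠ []) :
    pvMinDist c sel = 0 ↔ c ∈ sel := by
  cases sel with
  | nil => exact absurd rfl h
  | cons s rest =>
    rw [pvMinDist_eq_foldl]
    constructor
    · intro h0
      rcases foldl_min_cases (rest.map (pvDist c)) (pvDist c s) with he | ⟨x, hx, he⟩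
      · rw [he] at h0
        have : c = s := (pvDist_eq_zero c s).mp h0
        exact this ▸ List.mem_cons_self ..
      · rw [he] at h0
        rcases List.mem_map.mp hx with ⟨t, ht, rfl⟩
        have : c = t := (pvDist_eq_zero c t).mp h0
        exact List.mem_cons_of_mem _ (this ▸ ht)
    · intro hc
      have hub : (rest.map (pvDist c)).foldl min (pvDist c s) ≤ 0 := by
        rcases List.mem_cons.mp hc with rfl | hc
        · have := foldl_min_le_init (rest.map (pvDist c)) (pvDist c c)
          simpa [pvDist] using this
        · have : pvDist c c ∈ rest.map (pvDist c) := List.mem_map_of_mem hc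
          have := foldl_min_le_mem (rest.map (pvDist c)) (pvDist c s) _ this
          simpa [pvDist] using this
      have hlb : 0 ≤ (rest.map (pvDist c)).foldl min (pvDist c s) := by
        rw [← pvMinDist_eq_foldl]; exact pvMinDist_nonneg c (s :: rest) (by simp)
      omega

theorem pvMinDist_append (c p : Int × Int) (sel : List (Int × Int)) (h : sel ≠ []) :
    pvMinDist c (sel ++ [p]) = min (pvMinDist c sel) (pvDist c p) := by
  cases sel with
  | nil => exact absurd rfl h
  | cons s rest => simp [pvMinDist, List.foldl_append]

-- relation between the two scans' running states
def pvRel (a b : Option (Int × Int) × Int) : Prop :=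
  (a = (none, -1) ∧ b = (none, 0)) ∨ ∃ p m, 0 < m ∧ a = (some p, m) ∧ b = (some p, m)

theorem pv_scan_rel (sel : List (Int × Int)) (hsel : sel ≠ []) :
    ∀ (cs : List (Int × Int)) (a b : Option (Int × Int) × Int), pvRel a b →
      pvRel (cs.foldl (pvAStep sel) a)
            ((cs.map fun c => (c, pvMinDist c sel)).foldl pvBStep b) := by
  intro cs
  induction cs with
  | nil => intro a b h; simpa using h
  | cons c cs ih =>
    intro a b h
    simp only [List.map_cons, List.foldl_cons]
    apply ih
    by_cases hc : c ∈ sel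
    · have hmd : pvMinDist c sel = 0 := (pvMinDist_zero_iff c sel hsel).mpr hc
      rcases h with ⟨ha, hb⟩ | ⟨p, m, hm, ha, hb⟩ <;> subst ha <;> subst hb
      · simp only [pvAStep, pvBStep, if_pos hc, hmd, gt_iff_lt]
        rw [if_neg (by omega : ¬ (0:Int) < 0)]
        exact Or.inl ⟨rfl, rfl⟩
      · simp only [pvAStep, pvBStep, if_pos hc, hmd, gt_iff_lt]
        rw [if_neg (by omega : ¬ m < (0:Int))]
        exact Or.inr ⟨p, m, hm, rfl, rfl⟩
    · have hmd0 : pvMinDist c sel ≠ 0 := fun h0 => hc ((pvMinDist_zero_iff c sel hsel).mp h0)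
      have hpos : 0 < pvMinDist c sel := lt_of_le_of_ne (pvMinDist_nonneg c sel hsel) (Ne.symm hmd0)
      rcases h with ⟨ha, hb⟩ | ⟨p, m, hm, ha, hb⟩ <;> subst ha <;> subst hb
      · simp only [pvAStep, pvBStep, if_neg hc]
        have h1 : pvMinDist c sel > (-1 : Int) := by omega
        have h2 : pvMinDist c sel > (0 : Int) := hpos
        simp only [gt_iff_lt]
        rw [if_pos h1, if_pos h2]
        exact Or.inr ⟨c, pvMinDist c sel, hpos, rfl, rfl⟩
      · simp only [pvAStep, pvBStep, if_neg hc, gt_iff_lt]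
        by_cases hgt : m < pvMinDist c sel
        · rw [if_pos hgt]
          exact Or.inr ⟨c, pvMinDist c sel, hpos, rfl, rfl⟩
        · rw [if_neg hgt]
          exact Or.inr ⟨p, m, hm, rfl, rfl⟩

theorem pv_loop_eq (candidates : List (Int × Int)) :
    ∀ (fuel : Nat) (sel : List (Int × Int)), sel ≠ [] →
      pvALoop candidates fuel sel =
        pvBLoop fuel (candidates.map fun c => (c, pvMinDist c sel)) sel := by
  intro fuel
  induction fuel with
  | zero => intro sel _; simp [pvALoop, pvBLoop]
  | succ n ih =>
    intro sel hsel
    have hrel := pv_scan_rel sel hsel candidates (none, -1) (none, 0) (Or.inl ⟨rfl, rfl⟩)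
    rcases hrel with ⟨ha, hb⟩ | ⟨p, m, _, ha, hb⟩
    · simp [pvALoop, pvBLoop, pvAScan, pvBScan, ha, hb]
    · simp only [pvALoop, pvBLoop, pvAScan, pvBScan, ha, hb]
      rw [ih (sel ++ [p]) (by simp)]
      congr 1
      unfold pvBUpdate
      rw [List.map_map]
      refine List.map_congr_left fun c _ => ?_
      simp only [Function.comp]
      rw [pvMinDist_append c p sel hsel]

-- ===== VERDICT (by name: the statement is the Claim_ definition above) =====
theorem select_separated_locations_py_spec : Claim_equal_select_separated_locations_py := by
  intro candidates count _ hpre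
  unfold Spec_select_separated_locations_py
  unfold select_separated_locations_py select_separated_locations_py_alt
  by_cases hlen : (candidates.length : Int) ≤ count
  · simp [hlen]
  · rw [if_neg hlen, if_neg hlen]
    cases candidates with
    | nil =>
      rcases hpre with h | h
      · exact absurd rfl h
      · exact absurd (by simpa using h) hlen
    | cons c0 rest =>
      show pvALoop (c0 :: rest) (count - 1).toNat [c0]
          = pvBLoop (count - 1).toNat ((c0 :: rest).map fun c => (c, pvDist c c0)) [c0]
      rw [pv_loop_eq (c0 :: rest) (count - 1).toNat [c0] (by simp)]
      simp [pvMinDist]
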